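-- pv_equiv track=rewrite | github.com/AlexSabaka/RWKV-MLX | scripts/download_chat_datasets.py | build_sft_examples
-- ===== SOURCE A (Python) =====
-- IM_START = "<|im_start|>"
--
-- IM_END = "<|im_end|>"
--
-- def fmt_turn(role: str, content: str) -> str:
--     """Format a single conversation turn."""
--     return f"{IM_START}{role}\n{content}\n{IM_END}\n"
--
-- def build_sft_examples(turns: list[tuple[str, str]]) -> list[dict]:
--     """
--     Build SFT examples from a list of (role, content) tuples.
--
--     One example per assistant turn:
--       input  = all turns up to (not including) this assistant turn
--       output = this assistant turn
--
--     Skips examples where the assistant message is empty.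
--     """
--     examples = []
--     history = ""
--
--     for role, content in turns:
--         content = content.strip()
--         if role == "user":
--             history += fmt_turn("user", content)
--         elif role == "assistant":
--             if not content:
--                 # skip empty assistant turns
--                 history += fmt_turn("assistant", content)
--                 continue
--             output = fmt_turn("assistant", content)
--             if history:  # need at least one user turn in input
--                 examples.append({"input": history, "output": output})
--             history += output
--         else:
--             # unknown role — treat as user
--             history += fmt_turn(role, content)
--
--     return examples
-- ===== SOURCE B (Python) =====
-- IM_START = "<|im_start|>"
--
-- IM_END = "<|im_end|>"
--
-- def fmt_turn(role: str, content: str) -> str: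
--     """Format a single conversation turn."""
--     return f"{IM_START}{role}\n{content}\n{IM_END}\n"
--
-- def build_sft_examples(turns: list[tuple[str, str]]) -> list[dict]:
--     # Stateless decomposition: format every turn once, then read each
--     # example's input off as a prefix join (i > 0 <=> non-empty history,
--     # since every formatted turn is a non-empty string).
--     formatted = [fmt_turn(role, content.strip()) for role, content in turns]
--     return [
--         {"input": "".join(formatted[:i]), "output": formatted[i]}
--         for i, (role, content) in enumerate(turns)
--         if role == "assistant" and content.strip() and i > 0
--     ]
-- ===== Notes on version B (the rewrite author's own statement) =====
-- stated objective: simpler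
-- what changed: Replaces A's running history accumulator and branch-per-role loop with a precomputed list of formatted turns and a single comprehension that joins the prefix formatted[:i] for each non-empty assistant turn at i > 0.
import Mathlib
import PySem

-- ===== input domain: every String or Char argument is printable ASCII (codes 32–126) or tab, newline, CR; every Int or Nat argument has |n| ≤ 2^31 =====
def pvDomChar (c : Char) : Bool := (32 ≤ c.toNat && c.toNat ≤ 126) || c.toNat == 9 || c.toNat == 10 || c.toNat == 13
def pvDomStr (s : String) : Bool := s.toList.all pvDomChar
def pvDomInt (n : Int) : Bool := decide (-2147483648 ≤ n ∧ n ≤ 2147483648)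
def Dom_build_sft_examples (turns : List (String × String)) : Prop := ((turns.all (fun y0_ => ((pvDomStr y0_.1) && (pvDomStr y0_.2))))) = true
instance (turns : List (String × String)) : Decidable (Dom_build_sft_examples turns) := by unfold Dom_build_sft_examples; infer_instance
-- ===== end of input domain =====

-- B replaces A's running history accumulator with a precomputed list of formatted
-- turns and prefix joins — objective: simpler (stateless) decomposition, not speed.

-- ===== PORT A =====
-- fmt_turn(role, content)
def fmtTurn (role content : String) : String :=
  "<|im_start|>" ++ role ++ "\n" ++ content ++ "\n" ++ "<|im_end|>" ++ "\n"

-- A's for-loop over turns, with state (examples, history)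
def buildLoopA : List (String × String) → List (List (String × String)) → String → List (List (String × String))
  | [], examples, _ => examples
  | (role, content) :: rest, examples, history =>
    let c := PySem.Str.strip content
    if role == "user" then
      buildLoopA rest examples (history ++ fmtTurn "user" c)
    else if role == "assistant" then
      if c == "" then
        -- skip empty assistant turns
        buildLoopA rest examples (history ++ fmtTurn "assistant" c)
      else
        let output := fmtTurn "assistant" c
        if history == "" then
          buildLoopA rest examples (history ++ output)
        else
          buildLoopA rest (examples ++ [[("input", history), ("output", output)]]) (history ++ output)
    else
      -- unknown role — treat as user
      buildLoopA rest examples (history ++ fmtTurn role c)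

def build_sft_examples (turns : List (String × String)) : List (List (String × String)) :=
  buildLoopA turns [] ""

-- ===== PORT B =====
-- body of B's list comprehension: one candidate example per enumerated turn
def bExample (formatted : List String) (p : Int × (String × String)) : List (List (String × String)) :=
  if p.2.1 == "assistant" && !(PySem.Str.strip p.2.2 == "") && decide (0 < p.1) then
    [[("input", PySem.Str.join "" (PySem.List.slice formatted none (some p.1))),
      ("output", PySem.List.pyGetD formatted p.1 "")]]
  else []

def build_sft_examples_alt (turns : List (String × String)) : List (List (String × String)) :=
  let formatted := turns.map (fun rc => fmtTurn rc.1 (PySem.Str.strip rc.2))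
  (PySem.List.enumerate turns 0).flatMap (bExample formatted)

-- ===== PRECONDITION & SPEC =====
def Spec_build_sft_examples (turns : List (String × String)) (out : List (List (String × String))) : Prop := out = build_sft_examples_alt turns
instance (turns : List (String × String)) (out : List (List (String × String))) : Decidable (Spec_build_sft_examples turns out) := by unfold Spec_build_sft_examples; infer_instance

-- ===== CLAIM (what is proved, stated in full; the proofs are below) =====
def Claim_equal_build_sft_examples : Prop := ∀ (turns : List (String × String)), Dom_build_sft_examples turns → Spec_build_sft_examples turns (build_sft_examples turns)

-- ===== LEMMAS AND PROOFS =====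

-- the single formatted turn B precomputes for a (role, content) pair
def fmtOf (rc : String × String) : String := fmtTurn rc.1 (PySem.Str.strip rc.2)

theorem join_empty_eq_flatten (l : List String) :
    PySem.Str.join "" l = String.ofList (l.map String.toList).flatten := by
  apply String.toList_inj.mp
  simp [PySem.Str.toList_join, PySem.Chars.join, List.intercalate]
  induction l with
  | nil => rfl
  | cons x xs ih =>
    cases xs with
    | nil => rfl
    | cons y ys => simp_all

theorem join_empty_append_one (l : List String) (x : String) :
    PySem.Str.join "" (l ++ [x]) = PySem.Str.join "" l ++ x := by
  apply String.toList_inj.mp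
  simp [join_empty_eq_flatten]

theorem fmtTurn_toList_ne_nil (r c : String) : (fmtTurn r c).toList ≠ [] := by
  simp [fmtTurn]

theorem fmtTurn_ne_empty (r c : String) : fmtTurn r c ≠ "" := by
  intro h
  exact fmtTurn_toList_ne_nil r c (by rw [h]; rfl)

theorem join_fmt_eq_empty_iff (pre : List (String × String)) :
    (PySem.Str.join "" (pre.map fmtOf) == "") = decide (pre = []) := by
  cases pre with
  | nil => rfl
  | cons x xs =>
    have hne : PySem.Str.join "" (fmtOf x :: List.map fmtOf xs) ≠ "" := by
      intro h
      have h2 := congrArg String.toList h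
      rw [show fmtOf x :: List.map fmtOf xs = [fmtOf x] ++ xs.map fmtOf from rfl] at h2
      simp [join_empty_eq_flatten, fmtOf] at h2
      exact absurd h2.1 (fmtTurn_ne_empty _ _)
    simp [hne]

set_option maxHeartbeats 1000000 in
theorem loopA_invariant (rest : List (String × String)) :
    ∀ (pre : List (String × String)) (ex : List (List (String × String))),
    buildLoopA rest ex (PySem.Str.join "" (pre.map fmtOf)) =
      ex ++ (PySem.List.enumerate rest (pre.length : Int)).flatMap
              (bExample ((pre ++ rest).map fmtOf)) := by
  induction rest with
  | nil => intro pre ex; simp [buildLoopA, PySem.List.enumerate]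
  | cons t rest ih =>
    intro pre ex
    obtain ⟨role, content⟩ := t
    have hlen : ((pre ++ [(role, content)]).length : Int) = (pre.length : Int) + 1 := by simp
    have happ : pre ++ (role, content) :: rest = (pre ++ [(role, content)]) ++ rest := by simp
    have hJ : ∀ c : String,
        PySem.Str.join "" (pre.map fmtOf) ++ fmtTurn role (PySem.Str.strip content) =
        PySem.Str.join "" ((pre ++ [(role, content)]).map fmtOf) := by
      intro c
      rw [List.map_append,
          show List.map fmtOf [(role, content)] = [fmtOf (role, content)] from rfl,
          join_empty_append_one]
      rfl
    rw [PySem.List.enumerate_cons, List.flatMap_cons]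
    by_cases hu : role = "user"
    · -- user turn: no example from B (role ≠ "assistant"), history grows
      subst hu
      have hb : bExample ((pre ++ ("user", content) :: rest).map fmtOf) ((pre.length : Int), ("user", content)) = [] := by
        simp [bExample]
      rw [hb, List.nil_append]
      simp only [buildLoopA]
      rw [show ("user" == "user") = true from rfl, if_pos rfl]
      rw [hJ content, happ, ← hlen]
      exact ih (pre ++ [("user", content)]) ex
    · by_cases ha : role = "assistant"
      · subst ha
        simp only [buildLoopA]
        rw [show ("assistant" == "user") = false from rfl,
            show ("assistant" == "assistant") = true from rfl]
        simp only [Bool.false_eq_true, if_false, if_true]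
        by_cases hc : PySem.Str.strip content = ""
        · -- empty assistant turn: skipped by both
          have hb : bExample ((pre ++ ("assistant", content) :: rest).map fmtOf) ((pre.length : Int), ("assistant", content)) = [] := by
            simp [bExample, hc]
          rw [hb, List.nil_append, show (PySem.Str.strip content == "") = true from by simp [hc]]
          simp only [if_true]
          rw [hJ content, happ, ← hlen]
          exact ih (pre ++ [("assistant", content)]) ex
        · rw [show (PySem.Str.strip content == "") = false from by simp [hc]]
          simp only [Bool.false_eq_true, if_false]
          rw [join_fmt_eq_empty_iff pre]
          by_cases hp : pre = []
          · -- no history yet (i = 0): A skips the example, B's guard 0 < i fails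
            subst hp
            have hb : bExample (((([] : List (String × String))) ++ ("assistant", content) :: rest).map fmtOf) (((List.length ([] : List (String × String)) : Int)), ("assistant", content)) = [] := by
              simp [bExample]
            rw [hb, List.nil_append,
                show (decide (([] : List (String × String)) = [])) = true from rfl, if_pos rfl]
            rw [hJ content, happ, ← hlen]
            exact ih ([] ++ [("assistant", content)]) ex
          · -- history non-empty (i > 0): both emit the same example
            rw [show decide (pre = []) = false from by simp [hp]]
            simp only [Bool.false_eq_true, if_false]
            have hb : bExample ((pre ++ ("assistant", content) :: rest).map fmtOf) ((pre.length : Int), ("assistant", content)) =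
                [[("input", PySem.Str.join "" (pre.map fmtOf)),
                  ("output", fmtTurn "assistant" (PySem.Str.strip content))]] := by
              have hpos : 0 < pre.length := by
                have : pre.length ≠ 0 := by simpa [List.length_eq_zero_iff] using hp
                omega
              simp only [bExample]
              rw [show (("assistant" == "assistant") && !(PySem.Str.strip content == "") && decide ((0:Int) < (pre.length : Int))) = true from by
                simp [hc, hpos]]
              simp only [if_true]
              rw [PySem.List.slice_to_natCast, PySem.List.pyGetD_natCast]
              rw [List.map_append]
              rw [show pre.length = (pre.map fmtOf).length from by simp]
              rw [List.take_left, List.getD_eq_getElem?_getD, List.getElem?_append_right (by simp)]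
              simp [fmtOf]
            rw [hb, hJ content, happ, ← hlen]
            rw [ih (pre ++ [("assistant", content)]) (ex ++ [[("input", PySem.Str.join "" (pre.map fmtOf)), ("output", fmtTurn "assistant" (PySem.Str.strip content))]])]
            simp
      · -- unknown role — treated as user; B emits nothing (role ≠ "assistant")
        have hb : bExample ((pre ++ (role, content) :: rest).map fmtOf) ((pre.length : Int), (role, content)) = [] := by
          simp [bExample, ha]
        rw [hb, List.nil_append]
        simp only [buildLoopA]
        rw [show (role == "user") = false from by simp [hu],
            show (role == "assistant") = false from by simp [ha]]
        simp only [Bool.false_eq_true, if_false]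
        rw [hJ content, happ, ← hlen]
        exact ih (pre ++ [(role, content)]) ex

-- ===== VERDICT (by name: the statement is the Claim_ definition above) =====
theorem build_sft_examples_spec : Claim_equal_build_sft_examples := by
  intro turns _
  unfold Spec_build_sft_examples build_sft_examples build_sft_examples_alt
  have h := loopA_invariant turns [] []
  simpa [fmtOf] using h
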